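-- pv_equiv track=rewrite | github.com/lvsn/CameraNetwork | client/src/camera_drivers/scripts/gphoto_cam_server.py | _parse_device_space
-- ===== SOURCE A (Python) =====
-- def _parse_device_space(string):
--     """
--     Parse a gphoto2 string (gphoto2 --storage-info) to extract important information : total memory capacity
--     memory left and quantity of picture that can be still taken.
--     :param string:
--     :return totalspace, freespace, freeimages:
--     """
--     lineList = string.split('\n')
--     totalspace = ''
--     freespace = ''
--     freeimages = ''
--     totalspacekeyword = 'totalcapacity='
--     freespacekeyword = 'free='
--     freeimageskeyword = 'freeimages='
--
--     for n in lineList: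
--         if n.find(totalspacekeyword) == 0:
--             totalspace = n[len(totalspacekeyword):]
--         if n.find(freespacekeyword) == 0:
--             freespace = n[len(freespacekeyword):]
--         if n.find(freeimageskeyword) == 0:
--             freeimages = n[len(freeimageskeyword):]
--     return totalspace, freespace, freeimages
-- ===== SOURCE B (Python) =====
-- def _parse_device_space(string):
--     d = {}
--     for line in string.split('\n'):
--         key, sep, value = line.partition('=')
--         if sep:
--             d[key] = value
--     return (d.get('totalcapacity', ''), d.get('free', ''), d.get('freeimages', ''))
-- ===== Notes on version B (the rewrite author's own statement) =====
-- stated objective: idiomatic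
-- what changed: Replaces the three inline prefix-tests per line with a single build-then-lookup pass: each line is partitioned at its first equals sign into a key/value stored in a dict (last wins), and the three fields are read back with d.get.
import Mathlib
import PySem

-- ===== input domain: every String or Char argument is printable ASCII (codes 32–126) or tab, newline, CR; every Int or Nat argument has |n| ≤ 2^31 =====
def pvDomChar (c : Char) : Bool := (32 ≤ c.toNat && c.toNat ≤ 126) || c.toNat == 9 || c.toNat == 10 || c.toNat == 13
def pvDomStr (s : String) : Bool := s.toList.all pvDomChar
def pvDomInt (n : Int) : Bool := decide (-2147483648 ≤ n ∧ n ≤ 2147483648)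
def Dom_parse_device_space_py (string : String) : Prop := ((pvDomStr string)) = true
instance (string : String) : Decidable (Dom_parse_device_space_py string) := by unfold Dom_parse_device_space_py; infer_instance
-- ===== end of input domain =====

-- B builds a key→value dict from the '='-lines once and reads the three fields back; same return value as A everywhere.

-- ===== PORT A =====
-- one iteration of A's loop: three independent prefix tests (n.find(kw) == 0) updating the triple
def pvAStep (acc : List Char × List Char × List Char) (n : List Char) :
    List Char × List Char × List Char :=
  let acc1 := if PySem.Chars.find n "totalcapacity=".toList = 0 then
      (PySem.Chars.slice n (some (PySem.Chars.len "totalcapacity=".toList)) none, acc.2.1, acc.2.2) else acc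
  let acc2 := if PySem.Chars.find n "free=".toList = 0 then
      (acc1.1, PySem.Chars.slice n (some (PySem.Chars.len "free=".toList)) none, acc1.2.2) else acc1
  if PySem.Chars.find n "freeimages=".toList = 0 then
      (acc2.1, acc2.2.1, PySem.Chars.slice n (some (PySem.Chars.len "freeimages=".toList)) none) else acc2

def parse_device_space_py (string : String) : String × String × String :=
  let lineList := PySem.Chars.splitOn string.toList ['\n']
  let r := lineList.foldl pvAStep ([], [], [])
  (String.ofList r.1, String.ofList r.2.1, String.ofList r.2.2)

-- ===== PORT B =====
-- line.partition('='): scan for the first '='; some (before, after) iff '=' occurs (hand port, exact)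
def pvPartitionEq : List Char → Option (List Char × List Char)
  | [] => none
  | c :: rest =>
    if c = '=' then some ([], rest)
    else (pvPartitionEq rest).map (fun p => (c :: p.1, p.2))

def pvBStep (d : PySem.Dict (List Char) (List Char)) (line : List Char) :
    PySem.Dict (List Char) (List Char) :=
  match pvPartitionEq line with
  | some (k, v) => d.insert k v
  | none => d

def parse_device_space_py_alt (string : String) : String × String × String :=
  let d := (PySem.Chars.splitOn string.toList ['\n']).foldl pvBStep PySem.Dict.empty
  (String.ofList (d.getD "totalcapacity".toList []),
   String.ofList (d.getD "free".toList []),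
   String.ofList (d.getD "freeimages".toList []))

-- ===== PRECONDITION & SPEC =====
def Spec_parse_device_space_py (string : String) (out : String × String × String) : Prop := out = parse_device_space_py_alt string
instance (string : String) (out : String × String × String) : Decidable (Spec_parse_device_space_py string out) := by unfold Spec_parse_device_space_py; infer_instance

-- ===== CLAIM (what is proved, stated in full; the proofs are below) =====
def Claim_equal_parse_device_space_py : Prop := ∀ (string : String), Dom_parse_device_space_py string → Spec_parse_device_space_py string (parse_device_space_py string)

-- ===== LEMMAS AND PROOFS =====

lemma pvFind_eq_zero_iff (s sub : List Char) : PySem.Chars.find s sub = 0 ↔ sub <+: s := by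
  constructor
  · intro h
    have h0 : (0:Int) ≤ PySem.Chars.find s sub := le_of_eq h.symm
    have hspec := PySem.Chars.find_spec (s := s) (sub := sub) h0
    simpa [h] using hspec.1
  · intro hp
    have h0 : (0:Int) ≤ PySem.Chars.find s sub :=
      (PySem.Chars.find_nonneg_iff s sub).2 hp.isInfix
    have hspec := PySem.Chars.find_spec (s := s) (sub := sub) h0
    by_contra hne
    have hpos : 0 < (PySem.Chars.find s sub).toNat := by omega
    have := hspec.2 0 hpos
    simp at this
    exact this hp

lemma pvPartitionEq_none_iff (n : List Char) : pvPartitionEq n = none ↔ '=' ∉ n := by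
  induction n with
  | nil => simp [pvPartitionEq]
  | cons c rest ih =>
    by_cases hc : c = '='
    · simp [pvPartitionEq, hc]
    · simp [pvPartitionEq, hc, ih, Ne.symm hc]

lemma pvPartitionEq_some (n k v : List Char) (h : pvPartitionEq n = some (k, v)) :
    n = k ++ '=' :: v ∧ '=' ∉ k := by
  induction n generalizing k v with
  | nil => simp [pvPartitionEq] at h
  | cons c rest ih =>
    by_cases hc : c = '='
    · rw [pvPartitionEq, if_pos hc] at h
      simp only [Option.some.injEq, Prod.mk.injEq] at h
      obtain ⟨hk, hv⟩ := h
      subst hk; subst hv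
      exact ⟨by simp [hc], by simp⟩
    · rw [pvPartitionEq, if_neg hc] at h
      cases hrest : pvPartitionEq rest with
      | none => rw [hrest] at h; simp at h
      | some p =>
        obtain ⟨k', v'⟩ := p
        rw [hrest] at h
        simp only [Option.map_some, Option.some.injEq, Prod.mk.injEq] at h
        obtain ⟨hk, hv⟩ := h
        subst hk; subst hv
        obtain ⟨hrw, hnm⟩ := ih k' v' hrest
        refine ⟨by simp [hrw], ?_⟩
        intro hm
        rcases List.mem_cons.1 hm with h' | h'
        · exact hc h'.symm
        · exact hnm h'

-- a prefix kw++"=" of k++"="++v with '=' in neither kw nor k forces kw = k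
lemma pvPrefix_eq : ∀ (kw k v : List Char), '=' ∉ kw → '=' ∉ k →
    (kw ++ ['=']) <+: (k ++ '=' :: v) → kw = k
  | [], [], _, _, _, _ => rfl
  | [], c :: k', v, h1, h2, hp => by
      obtain ⟨t, ht⟩ := hp
      simp only [List.nil_append, List.cons_append] at ht
      injection ht with hce _
      exact absurd (List.mem_cons.2 (Or.inl hce)) h2
  | a :: kw', [], v, h1, h2, hp => by
      obtain ⟨t, ht⟩ := hp
      simp only [List.cons_append, List.nil_append] at ht
      injection ht with hce _
      exact absurd (List.mem_cons.2 (Or.inl hce.symm)) h1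
  | a :: kw', c :: k', v, h1, h2, hp => by
      obtain ⟨t, ht⟩ := hp
      simp only [List.cons_append] at ht
      injection ht with hac hrest
      have h1' : '=' ∉ kw' := fun hh => h1 (List.mem_cons.2 (Or.inr hh))
      have h2' : '=' ∉ k' := fun hh => h2 (List.mem_cons.2 (Or.inr hh))
      have hih := pvPrefix_eq kw' k' v h1' h2' ⟨t, hrest⟩
      rw [hac, hih]

-- per-line correspondence: B's dict lookup at key kw tracks A's test on keyword kw++"="
lemma pvStep_getD (d : PySem.Dict (List Char) (List Char)) (n kw : List Char) (h : '=' ∉ kw) :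
    (pvBStep d n).getD kw [] =
      if PySem.Chars.find n (kw ++ ['=']) = 0 then n.drop (kw.length + 1) else d.getD kw [] := by
  cases hpe : pvPartitionEq n with
  | none =>
    have hne : '=' ∉ n := (pvPartitionEq_none_iff n).1 hpe
    have hnp : ¬ (kw ++ ['=']) <+: n := fun hp => hne (hp.subset (by simp))
    simp [pvBStep, hpe, pvFind_eq_zero_iff, hnp]
  | some p =>
    obtain ⟨k0, v0⟩ := p
    obtain ⟨hn, hk⟩ := pvPartitionEq_some n k0 v0 hpe
    by_cases hkw : kw = k0
    · subst hkw
      have hpref : (kw ++ ['=']) <+: n := ⟨v0, by simp [hn]⟩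
      have hfind : PySem.Chars.find n (kw ++ ['=']) = 0 := (pvFind_eq_zero_iff n _).2 hpref
      have hdrop : n.drop (kw.length + 1) = v0 := by
        rw [hn, show kw ++ '=' :: v0 = (kw ++ ['=']) ++ v0 by simp,
          show kw.length + 1 = (kw ++ ['=']).length by simp, List.drop_left]
      simp [pvBStep, hpe, hfind, hdrop, PySem.Dict.getD_insert_self]
    · have hfind : PySem.Chars.find n (kw ++ ['=']) ≠ 0 := by
        intro h0
        have hpref := (pvFind_eq_zero_iff n _).1 h0
        rw [hn] at hpref
        exact hkw (pvPrefix_eq kw k0 v0 h hk hpref)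
      simp [pvBStep, hpe, hfind, PySem.Dict.getD_insert, hkw]

lemma pvAStep_fst (acc : List Char × List Char × List Char) (n : List Char) :
    (pvAStep acc n).1 = if PySem.Chars.find n "totalcapacity=".toList = 0
      then PySem.Chars.slice n (some (PySem.Chars.len "totalcapacity=".toList)) none else acc.1 := by
  simp only [pvAStep]
  split_ifs <;> rfl

lemma pvAStep_snd1 (acc : List Char × List Char × List Char) (n : List Char) :
    (pvAStep acc n).2.1 = if PySem.Chars.find n "free=".toList = 0
      then PySem.Chars.slice n (some (PySem.Chars.len "free=".toList)) none else acc.2.1 := by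
  simp only [pvAStep]
  split_ifs <;> rfl

lemma pvAStep_snd2 (acc : List Char × List Char × List Char) (n : List Char) :
    (pvAStep acc n).2.2 = if PySem.Chars.find n "freeimages=".toList = 0
      then PySem.Chars.slice n (some (PySem.Chars.len "freeimages=".toList)) none else acc.2.2 := by
  simp only [pvAStep]
  split_ifs <;> rfl

lemma pvSlice_drop (n : List Char) (kw : List Char) :
    PySem.Chars.slice n (some (PySem.Chars.len kw)) none = n.drop kw.length := by
  have : PySem.Chars.len kw = ((kw.length : Nat) : Int) := by simp
  rw [this]
  simp [PySem.List.slice_from_natCast]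

-- the fold invariant: each component of A's triple equals B's dict lookup
lemma pvFold_inv (lines : List (List Char)) (d : PySem.Dict (List Char) (List Char))
    (acc : List Char × List Char × List Char)
    (h1 : d.getD "totalcapacity".toList [] = acc.1)
    (h2 : d.getD "free".toList [] = acc.2.1)
    (h3 : d.getD "freeimages".toList [] = acc.2.2) :
    ((lines.foldl pvBStep d).getD "totalcapacity".toList [] = (lines.foldl pvAStep acc).1) ∧
    ((lines.foldl pvBStep d).getD "free".toList [] = (lines.foldl pvAStep acc).2.1) ∧
    ((lines.foldl pvBStep d).getD "freeimages".toList [] = (lines.foldl pvAStep acc).2.2) := by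
  induction lines generalizing d acc with
  | nil => exact ⟨h1, h2, h3⟩
  | cons n rest ih =>
    simp only [List.foldl_cons]
    apply ih
    · rw [pvStep_getD d n "totalcapacity".toList (by decide), pvAStep_fst, pvSlice_drop,
        show "totalcapacity".toList ++ ['='] = "totalcapacity=".toList by decide,
        show ("totalcapacity".toList).length + 1 = ("totalcapacity=".toList).length by decide]
      split_ifs with hc
      · rfl
      · exact h1
    · rw [pvStep_getD d n "free".toList (by decide), pvAStep_snd1, pvSlice_drop,
        show "free".toList ++ ['='] = "free=".toList by decide,
        show ("free".toList).length + 1 = ("free=".toList).length by decide]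
      split_ifs with hc
      · rfl
      · exact h2
    · rw [pvStep_getD d n "freeimages".toList (by decide), pvAStep_snd2, pvSlice_drop,
        show "freeimages".toList ++ ['='] = "freeimages=".toList by decide,
        show ("freeimages".toList).length + 1 = ("freeimages=".toList).length by decide]
      split_ifs with hc
      · rfl
      · exact h3

-- ===== VERDICT (by name: the statement is the Claim_ definition above) =====
theorem parse_device_space_py_spec : Claim_equal_parse_device_space_py := by
  intro s _
  obtain ⟨e1, e2, e3⟩ := pvFold_inv (PySem.Chars.splitOn s.toList ['\n']) PySem.Dict.empty
    ([], [], []) (by simp) (by simp) (by simp)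
  simp only [Spec_parse_device_space_py, parse_device_space_py, parse_device_space_py_alt]
  rw [e1, e2, e3]
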